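-- pv_equiv track=rewrite | github.com/topher416/snmi-network | transform_to_hybrid_graph.py | categorize_org
-- ===== SOURCE A (Python) =====
-- def categorize_org(org_name):
--     """Categorize organization by name."""
--     name_lower = org_name.lower()
--
--     if 'unaffiliated' in name_lower or not org_name.strip():
--         return 'Unaffiliated'
--     elif any(word in name_lower for word in ['hospital', 'health', 'medical', 'medicine', 'clinic', 'care']):
--         return 'Healthcare'
--     elif any(word in name_lower for word in ['state', 'county', 'city', 'government', 'governor', 'department', 'hfs']):
--         return 'Government'
--     elif any(word in name_lower for word in ['university', 'college', 'uic']):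
--         return 'Education'
--     elif any(word in name_lower for word in ['foundation', 'trust', 'committee', 'association', 'network', 'coalition']):
--         return 'Nonprofit'
--     else:
--         return 'Private'
-- ===== SOURCE B (Python) =====
-- CATEGORIES = ['Unaffiliated', 'Healthcare', 'Government', 'Education', 'Nonprofit', 'Private']
--
-- KEYWORD_RANK = {
--     'unaffiliated': 0,
--     'hospital': 1, 'health': 1, 'medical': 1, 'medicine': 1, 'clinic': 1, 'care': 1,
--     'state': 2, 'county': 2, 'city': 2, 'government': 2, 'governor': 2, 'department': 2, 'hfs': 2,
--     'university': 3, 'college': 3, 'uic': 3,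
--     'foundation': 4, 'trust': 4, 'committee': 4, 'association': 4, 'network': 4, 'coalition': 4,
-- }
--
--
-- def categorize_org(org_name):
--     """Categorize organization by name: lowest-ranked matching keyword wins."""
--     name = org_name.lower()
--     best = 0 if not org_name.strip() else len(CATEGORIES) - 1
--     for kw, rank in KEYWORD_RANK.items():
--         if rank < best and kw in name:
--             best = rank
--     return CATEGORIES[best]
-- ===== Notes on version B (the rewrite author's own statement) =====
-- stated objective: alternative
-- what changed: Replaces the if/elif cascade of any() substring checks (early return on the first matching category) by a rank-minimisation fold: every keyword carries a numeric rank in one flat keyword-to-rank map, a single full scan keeps the minimum rank of any matched keyword (seeded by the empty-name guard), and the answer is an index into a category array.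
import Mathlib
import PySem

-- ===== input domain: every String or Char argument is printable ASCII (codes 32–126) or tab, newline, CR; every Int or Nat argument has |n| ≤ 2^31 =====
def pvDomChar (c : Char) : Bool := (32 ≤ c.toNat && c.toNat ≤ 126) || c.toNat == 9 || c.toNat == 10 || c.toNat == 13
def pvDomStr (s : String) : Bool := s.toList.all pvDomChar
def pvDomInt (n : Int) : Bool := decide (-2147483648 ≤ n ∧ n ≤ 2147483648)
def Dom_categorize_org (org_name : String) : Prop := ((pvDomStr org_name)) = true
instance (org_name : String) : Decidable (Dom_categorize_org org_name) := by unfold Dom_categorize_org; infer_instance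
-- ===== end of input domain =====

-- B replaces A's if/elif cascade of any() checks by a rank-minimisation fold over a
-- flat keyword->rank map, then indexes a category array; same cost, different algorithm.


-- ===== PORT A =====
def categorize_org (org_name : String) : String :=
  let name_lower := PySem.Str.lower org_name
  if PySem.Str.isIn "unaffiliated" name_lower || PySem.Str.strip org_name == "" then
    "Unaffiliated"
  else if ["hospital", "health", "medical", "medicine", "clinic", "care"].any
      (fun word => PySem.Str.isIn word name_lower) then
    "Healthcare"
  else if ["state", "county", "city", "government", "governor", "department", "hfs"].any
      (fun word => PySem.Str.isIn word name_lower) then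
    "Government"
  else if ["university", "college", "uic"].any
      (fun word => PySem.Str.isIn word name_lower) then
    "Education"
  else if ["foundation", "trust", "committee", "association", "network", "coalition"].any
      (fun word => PySem.Str.isIn word name_lower) then
    "Nonprofit"
  else
    "Private"

-- ===== PORT B =====
def pvCategories : List String :=
  ["Unaffiliated", "Healthcare", "Government", "Education", "Nonprofit", "Private"]

-- KEYWORD_RANK: dict[str, int] as an association list in insertion order
def pvKeywordRank : List (String × Int) :=
  [("unaffiliated", 0),
   ("hospital", 1), ("health", 1), ("medical", 1), ("medicine", 1), ("clinic", 1), ("care", 1),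
   ("state", 2), ("county", 2), ("city", 2), ("government", 2), ("governor", 2), ("department", 2), ("hfs", 2),
   ("university", 3), ("college", 3), ("uic", 3),
   ("foundation", 4), ("trust", 4), ("committee", 4), ("association", 4), ("network", 4), ("coalition", 4)]

def categorize_org_alt (org_name : String) : String :=
  let name := PySem.Str.lower org_name
  let best0 : Int := if PySem.Str.strip org_name == "" then 0 else 5  -- len(CATEGORIES) - 1
  let best := pvKeywordRank.foldl
    (fun b p => if decide (p.2 < b) && PySem.Str.isIn p.1 name then p.2 else b) best0
  -- CATEGORIES[best]: best is always in [0, 5], so plain indexing is exact here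
  PySem.List.pyGetD pvCategories best "Private"

-- ===== PRECONDITION & SPEC =====
def Spec_categorize_org (org_name : String) (out : String) : Prop := out = categorize_org_alt org_name
instance (org_name : String) (out : String) : Decidable (Spec_categorize_org org_name out) := by unfold Spec_categorize_org; infer_instance

-- ===== CLAIM =====
def Claim_equal_categorize_org : Prop := ∀ (org_name : String), Dom_categorize_org org_name → Spec_categorize_org org_name (categorize_org org_name)

-- ===== LEMMAS AND PROOFS =====

-- Folding the min-rank step over a block of keywords that all carry the same rank r
-- lowers the accumulator to r exactly when some keyword of the block matches and r < best.
lemma pvScanGroup {m : String → Bool} (r : Int) (kws : List String) (best : Int) :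
    List.foldl (fun b p => if decide (p.2 < b) && m p.1 then p.2 else b)
      best (kws.map (fun k => (k, r)))
    = if kws.any m && decide (r < best) then r else best := by
  induction kws generalizing best with
  | nil => simp
  | cons k rest ih =>
    simp only [List.map_cons, List.foldl_cons, List.any_cons]
    rcases Bool.eq_false_or_eq_true (m k) with hm | hm
    · -- m k = true
      have hacc : (if (decide (r < best) && m k) = true then r else best)
          = if r < best then r else best := by simp [hm]
      rw [hacc]
      simp only [hm, Bool.true_or, Bool.true_and]
      by_cases hr : r < best
      · rw [if_pos hr, ih]
        simp [hr]
      · rw [if_neg hr, ih]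
        simp [hr]
    · -- m k = false
      have hacc : (if (decide (r < best) && m k) = true then r else best) = best := by simp [hm]
      rw [hacc, ih]
      simp only [hm, Bool.false_or]

-- the flat keyword->rank list is the concatenation of its five equal-rank blocks
lemma pvKeywordRank_blocks :
    pvKeywordRank =
      (["unaffiliated"].map (fun k => (k, (0 : Int))))
      ++ (["hospital", "health", "medical", "medicine", "clinic", "care"].map (fun k => (k, (1 : Int))))
      ++ (["state", "county", "city", "government", "governor", "department", "hfs"].map (fun k => (k, (2 : Int))))
      ++ (["university", "college", "uic"].map (fun k => (k, (3 : Int))))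
      ++ (["foundation", "trust", "committee", "association", "network", "coalition"].map (fun k => (k, (4 : Int)))) := rfl

-- ===== VERDICT =====
theorem categorize_org_spec : Claim_equal_categorize_org := by
  intro org_name _
  unfold Spec_categorize_org categorize_org categorize_org_alt
  rw [pvKeywordRank_blocks]
  simp only [List.foldl_append]
  rw [pvScanGroup (m := fun k => PySem.Str.isIn k (PySem.Str.lower org_name)),
     pvScanGroup (m := fun k => PySem.Str.isIn k (PySem.Str.lower org_name)),
     pvScanGroup (m := fun k => PySem.Str.isIn k (PySem.Str.lower org_name)),
     pvScanGroup (m := fun k => PySem.Str.isIn k (PySem.Str.lower org_name)),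
     pvScanGroup (m := fun k => PySem.Str.isIn k (PySem.Str.lower org_name))]
  have hu' : PySem.Str.isIn "unaffiliated" (PySem.Str.lower org_name)
      = (["unaffiliated"].any (fun k => PySem.Str.isIn k (PySem.Str.lower org_name))) := by simp
  rw [hu']
  generalize (PySem.Str.strip org_name == "") = e
  generalize (["unaffiliated"].any (fun k => PySem.Str.isIn k (PySem.Str.lower org_name))) = u
  generalize (["hospital", "health", "medical", "medicine", "clinic", "care"].any
      (fun k => PySem.Str.isIn k (PySem.Str.lower org_name))) = a1
  generalize (["state", "county", "city", "government", "governor", "department", "hfs"].any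
      (fun k => PySem.Str.isIn k (PySem.Str.lower org_name))) = a2
  generalize (["university", "college", "uic"].any
      (fun k => PySem.Str.isIn k (PySem.Str.lower org_name))) = a3
  generalize (["foundation", "trust", "committee", "association", "network", "coalition"].any
      (fun k => PySem.Str.isIn k (PySem.Str.lower org_name))) = a4
  revert e u a1 a2 a3 a4
  decide
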